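-- pv_equiv track=rewrite | github.com/Hsbtqemy/ColleC | src/archives_tool/files/paths.py | detecter_collisions_casse
-- ===== SOURCE A (Python) =====
-- import unicodedata
-- from collections.abc import Iterable, Mapping
--
-- def normaliser_nfc(chaine: str) -> str:
--     """Normalise en Unicode NFC. Idempotent."""
--     return unicodedata.normalize("NFC", chaine)
--
-- def detecter_collisions_casse(noms: Iterable[str]) -> list[tuple[str, str]]:
--     """Repère les paires de noms ne différant que par la casse ou la forme
--     Unicode.
--
--     Essentiel lors d'un import : sous Linux `Image.TIF` et `image.tif`
--     coexistent, mais l'archive deviendra incohérente si elle est migrée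
--     sur Windows/macOS. On normalise en NFC puis casefold pour que la
--     comparaison soit stable entre OS.
--     """
--     vus: dict[str, str] = {}
--     collisions: list[tuple[str, str]] = []
--     for nom in noms:
--         cle = normaliser_nfc(nom).casefold()
--         if cle in vus and vus[cle] != nom:
--             collisions.append((vus[cle], nom))
--         else:
--             vus.setdefault(cle, nom)
--     return collisions
-- ===== SOURCE B (Python) =====
-- import unicodedata
--
-- def detecter_collisions_casse(noms):
--     """Staged passes instead of A's single stateful loop: (1) compute each
--     name's NFC+casefold key, (2) build the COMPLETE key -> first-occurrence
--     map by plain overwriting assignment while walking the list in REVERSE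
--     (the last write, i.e. the earliest name, wins), (3) emit the collision
--     pairs with a stateless comprehension: a name collides iff the map's
--     representative for its key is a different name."""
--     noms = list(noms)
--     cles = [unicodedata.normalize("NFC", n).casefold() for n in noms]
--     premier = {}
--     for cle, nom in zip(reversed(cles), reversed(noms)):
--         premier[cle] = nom
--     return [(premier[cle], nom) for cle, nom in zip(cles, noms) if premier[cle] != nom]
-- ===== Notes on version B (the rewrite author's own statement) =====
-- stated objective: alternative
-- what changed: Replaced A's single stateful pass (incremental dict with setdefault and an in-loop membership test) by three staged stateless passes: precompute all keys, build the complete key->first-occurrence map by overwriting while iterating in reverse, then emit collisions with a pure comprehension over the full map.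
import Mathlib
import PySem

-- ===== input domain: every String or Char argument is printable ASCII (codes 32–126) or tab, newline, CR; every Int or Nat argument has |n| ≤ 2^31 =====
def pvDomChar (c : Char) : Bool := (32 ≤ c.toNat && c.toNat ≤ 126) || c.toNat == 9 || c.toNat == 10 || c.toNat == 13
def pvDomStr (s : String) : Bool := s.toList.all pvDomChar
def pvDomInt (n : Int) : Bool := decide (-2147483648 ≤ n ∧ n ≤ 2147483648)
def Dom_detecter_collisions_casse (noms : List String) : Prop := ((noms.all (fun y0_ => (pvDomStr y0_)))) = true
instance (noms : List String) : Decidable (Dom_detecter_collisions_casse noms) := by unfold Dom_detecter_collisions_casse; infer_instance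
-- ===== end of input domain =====

-- B replaces A's single stateful pass (incremental dict + setdefault) by three staged
-- passes: key list, complete key->first-occurrence map built by reverse overwriting,
-- then a stateless comprehension (objective: alternative).
-- normaliser_nfc + casefold is ported as PySem.Str.lower, exact on the printable-ASCII
-- domain Dom_ (NFC is the identity and casefold = lower on ASCII).


-- ===== PORT A =====
-- loop body of A: key into the dict of first-seen names; append a pair on a
-- case/normalization collision with a different name, else setdefault.
-- (`vus[cle]` is ported as `getD cle ""`: it is only reached under `contains cle`.)
def pvStepA (st : PySem.Dict String String × List (String × String)) (nom : String) :
    PySem.Dict String String × List (String × String) :=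
  let cle := PySem.Str.lower nom
  if st.1.contains cle ∧ st.1.getD cle "" ≠ nom then
    (st.1, st.2 ++ [(st.1.getD cle "", nom)])
  else
    (st.1.setdefault cle nom, st.2)

def detecter_collisions_casse (noms : List String) : List (String × String) :=
  (noms.foldl pvStepA (PySem.Dict.empty, [])).2

-- ===== PORT B =====
-- B, pass by pass: `cles` (all keys), `premier` (the full key->first-occurrence map,
-- built by overwriting inserts over the REVERSED zip), then the comprehension.
-- (`premier[cle]` is ported as `getD cle ""`: every cle was inserted, so it never misses.)
def detecter_collisions_casse_alt (noms : List String) : List (String × String) :=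
  let cles := noms.map PySem.Str.lower
  let premier := (cles.reverse.zip noms.reverse).foldl
      (fun d p => d.insert p.1 p.2) PySem.Dict.empty
  (cles.zip noms).filterMap (fun p =>
    if premier.getD p.1 "" ≠ p.2 then some (premier.getD p.1 "", p.2) else none)

-- ===== PRECONDITION & SPEC =====
def Spec_detecter_collisions_casse (noms : List String) (out : List (String × String)) : Prop := out = detecter_collisions_casse_alt noms
instance (noms : List String) (out : List (String × String)) : Decidable (Spec_detecter_collisions_casse noms out) := by unfold Spec_detecter_collisions_casse; infer_instance

-- ===== CLAIM (what is proved, stated in full; the proofs are below) =====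
def Claim_equal_detecter_collisions_casse : Prop := ∀ (noms : List String), Dom_detecter_collisions_casse noms → Spec_detecter_collisions_casse noms (detecter_collisions_casse noms)

-- ===== LEMMAS AND PROOFS =====

-- first occurrence of a key in `noms`
def pvFirst (noms : List String) (k : String) : Option String :=
  noms.find? (fun m => PySem.Str.lower m == k)

-- what B emits for one name, given the whole list
def pvEmit (noms : List String) (nom : String) : Option (String × String) :=
  match pvFirst noms (PySem.Str.lower nom) with
  | some rep => if rep ≠ nom then some (rep, nom) else none
  | none => none

-- lookup after a fresh setdefault (key absent): old lookup, else the new pair.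
lemma pv_get_setdefault (d : PySem.Dict String String) (k0 v k : String)
    (h : d.contains k0 = false) :
    (d.setdefault k0 v).get? k = ((d.get? k).or (if k0 == k then some v else none)) := by
  simp only [PySem.Dict.setdefault, h, Bool.false_eq_true, if_false,
    PySem.Dict.get?, List.find?_append]
  cases hf : List.find? (fun p => p.1 == k) d.items <;>
    simp [List.find?, Option.or]; (split <;> simp_all)

-- first match in p ++ [x]: the match in p, else x if it matches.
lemma pv_find_append (p : List String) (x : String) (f : String → Bool) :
    (p ++ [x]).find? f = ((p.find? f).or (if f x then some x else none)) := by
  cases hf : p.find? f <;> simp [List.find?_append, hf, List.find?, Option.or]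
  split <;> simp_all

-- the reverse-overwrite build: its lookup is the FIRST pair of the forward list.
lemma pv_build_rev (l : List (String × String)) (d0 : PySem.Dict String String)
    (k : String) :
    ((l.reverse.foldl (fun d p => d.insert p.1 p.2) d0)).get? k =
      ((l.find? (fun p => p.1 == k)).map Prod.snd).or (d0.get? k) := by
  induction l generalizing d0 with
  | nil => simp
  | cons p t ih =>
    simp only [List.reverse_cons, List.foldl_append, List.foldl_cons, List.foldl_nil,
      List.find?]
    rw [PySem.Dict.get?_insert, ih]
    by_cases hk : k = p.1
    · simp [hk, Option.or]
    · have : (p.1 == k) = false := by simp; exact fun h => hk h.symm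
      simp [hk, this]

-- B's comprehension is the pointwise emission by first occurrence.
lemma pv_alt_eq_filterMap (noms : List String) :
    detecter_collisions_casse_alt noms = noms.filterMap (pvEmit noms) := by
  have hz : ∀ l : List String, (l.map PySem.Str.lower).zip l =
      l.map (fun n => (PySem.Str.lower n, n)) := by
    intro l; induction l with
    | nil => rfl
    | cons x t ih => simp [ih]
  have hz2 : (noms.map PySem.Str.lower).reverse.zip noms.reverse =
      (noms.map (fun n => (PySem.Str.lower n, n))).reverse := by
    rw [← List.map_reverse, hz, List.map_reverse]
  unfold detecter_collisions_casse_alt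
  simp only [hz, hz2, List.filterMap_map]
  have hget : ∀ k, (((noms.map (fun n => (PySem.Str.lower n, n))).reverse.foldl
      (fun d p => d.insert p.1 p.2) PySem.Dict.empty)).get? k = pvFirst noms k := by
    intro k
    rw [pv_build_rev]
    simp only [List.find?_map, Function.comp_def, PySem.Dict.get?_empty, Option.or_none,
      pvFirst]
    cases noms.find? (fun m => PySem.Str.lower m == k) <;> simp
  apply List.filterMap_congr
  intro nom hmem
  have hself : pvFirst noms (PySem.Str.lower nom) ≠ none := by
    intro hnone
    have := List.find?_eq_none.mp hnone nom hmem
    simp at this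
  obtain ⟨rep, hrep⟩ := Option.ne_none_iff_exists'.mp hself
  have hgetD : ((noms.map (fun n => (PySem.Str.lower n, n))).reverse.foldl
      (fun d p => d.insert p.1 p.2) PySem.Dict.empty).getD (PySem.Str.lower nom) "" = rep := by
    rw [PySem.Dict.getD_eq_get?_getD, hget, hrep]; rfl
  simp only [Function.comp_def, hgetD, pvEmit, hrep]

-- Main loop invariant: running A's fold over `rest` with a dict that answers
-- first-occurrence over the prefix `p` appends exactly B's emissions over `rest`.
lemma pv_main (noms : List String) (rest p : List String)
    (d : PySem.Dict String String) (acc : List (String × String))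
    (hsplit : noms = p ++ rest)
    (hinv : ∀ k, d.get? k = pvFirst p k) :
    (rest.foldl pvStepA (d, acc)).2 = acc ++ rest.filterMap (pvEmit noms) := by
  induction rest generalizing p d acc with
  | nil => simp
  | cons nom rest ih =>
    have hfull : ∀ k, pvFirst noms k =
        ((pvFirst p k).or (pvFirst (nom :: rest) k)) := by
      intro k; simp [pvFirst, hsplit, List.find?_append]
    simp only [List.foldl_cons, List.filterMap_cons]
    by_cases hp : pvFirst p (PySem.Str.lower nom) = none
    · -- key unseen in the prefix: nom is its own first occurrence, no pair
      have hgetn : d.get? (PySem.Str.lower nom) = none := (hinv _).trans hp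
      have hcont : d.contains (PySem.Str.lower nom) = false := by
        rw [PySem.Dict.contains_eq_isSome_get?, hgetn]; rfl
      have hemit : pvEmit noms nom = none := by
        have : pvFirst noms (PySem.Str.lower nom) = some nom := by
          rw [hfull, hp]; simp [pvFirst, List.find?]
        simp [pvEmit, this]
      have hstepA : pvStepA (d, acc) nom =
          (d.setdefault (PySem.Str.lower nom) nom, acc) := by
        simp [pvStepA, hcont]
      rw [hstepA]
      simp only [hemit]
      apply ih (p ++ [nom]) _ _ (by simpa using hsplit)
      intro k
      rw [pv_get_setdefault d _ nom k hcont, hinv k]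
      simp only [pvFirst, pv_find_append]
    · -- key already in the prefix: both sides use the SAME first representative
      obtain ⟨rep, hrep⟩ := Option.ne_none_iff_exists'.mp hp
      have hget : d.get? (PySem.Str.lower nom) = some rep := (hinv _).trans hrep
      have hcont : d.contains (PySem.Str.lower nom) = true := by
        rw [PySem.Dict.contains_eq_isSome_get?, hget]; rfl
      have hgetD : d.getD (PySem.Str.lower nom) "" = rep := by
        rw [PySem.Dict.getD_eq_get?_getD, hget]; rfl
      have hemit : pvEmit noms nom = if rep ≠ nom then some (rep, nom) else none := by
        have : pvFirst noms (PySem.Str.lower nom) = some rep := by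
          rw [hfull, hrep]; rfl
        simp [pvEmit, this]
      have hinv' : ∀ k, d.get? k = pvFirst (p ++ [nom]) k := by
        intro k
        rw [hinv k]; simp only [pvFirst, pv_find_append]
        by_cases hk : PySem.Str.lower nom = k
        · subst hk; simp [pvFirst] at hrep ⊢; simp [hrep]
        · simp [hk]
      by_cases hne : rep = nom
      · have hstepA : pvStepA (d, acc) nom = (d, acc) := by
          simp [pvStepA, hgetD, hne, PySem.Dict.setdefault, hcont]
        rw [hstepA]
        simp only [hemit, hne, ne_eq, not_true_eq_false, if_false]
        exact ih (p ++ [nom]) d acc (by simpa using hsplit) hinv'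
      · have hstepA : pvStepA (d, acc) nom = (d, acc ++ [(rep, nom)]) := by
          simp [pvStepA, hcont, hgetD, hne]
        rw [hstepA]
        simp only [hemit, hne, ne_eq, not_false_eq_true, if_true]
        rw [ih (p ++ [nom]) d (acc ++ [(rep, nom)]) (by simpa using hsplit) hinv']
        simp

-- ===== VERDICT (by name: the statement is the Claim_ definition above) =====
theorem detecter_collisions_casse_spec : Claim_equal_detecter_collisions_casse := by
  intro noms _
  show _ = _
  rw [pv_alt_eq_filterMap]
  unfold detecter_collisions_casse
  simpa using pv_main noms noms [] PySem.Dict.empty [] rfl (fun k => rfl)
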